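-- pv_equiv track=rewrite | github.com/petereon/ward-coverage | src/ward_coverage/hook_impl.py | preprocess_missing_lines
-- ===== SOURCE A (Python) =====
-- from typing import Any, Dict, List, Union
--
-- def preprocess_missing_lines(missing_lines: list) -> str:
--     res = []
--     if len(missing_lines) == 0:
--         return ""
--     for sequence in group_sequence(missing_lines):
--         if len(sequence) > 1:
--             res.append(str(sequence[0]) + "-" + str(sequence[-1]))
--         else:
--             res.append(str(sequence[0]))
--     return ", ".join(res)
--
-- def group_sequence(lst: List[int]) -> list:
--     res = [[lst[0]]]
--     for i in range(1, len(lst)):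
--         if lst[i - 1] + 1 == lst[i]:
--             res[-1].append(lst[i])
--         else:
--             res.append([lst[i]])
--     return res
-- ===== SOURCE B (Python) =====
-- def preprocess_missing_lines(missing_lines: list) -> str:
--     # Single linear pass tracking the current run's start/prev; no intermediate list-of-lists.
--     if not missing_lines:
--         return ""
--     parts = []
--     start = prev = missing_lines[0]
--     for cur in missing_lines[1:]:
--         if cur != prev + 1:
--             parts.append(str(start) if start == prev else str(start) + "-" + str(prev))
--             start = cur
--         prev = cur
--     parts.append(str(start) if start == prev else str(start) + "-" + str(prev))
--     return ", ".join(parts)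
-- ===== Notes on version B (the rewrite author's own statement) =====
-- stated objective: simpler
-- what changed: B replaces A's two-phase algorithm (build a list-of-lists of runs, then format each run) with one streaming pass that tracks only the current run's start and prev and emits each formatted run at its boundary.
import Mathlib
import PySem

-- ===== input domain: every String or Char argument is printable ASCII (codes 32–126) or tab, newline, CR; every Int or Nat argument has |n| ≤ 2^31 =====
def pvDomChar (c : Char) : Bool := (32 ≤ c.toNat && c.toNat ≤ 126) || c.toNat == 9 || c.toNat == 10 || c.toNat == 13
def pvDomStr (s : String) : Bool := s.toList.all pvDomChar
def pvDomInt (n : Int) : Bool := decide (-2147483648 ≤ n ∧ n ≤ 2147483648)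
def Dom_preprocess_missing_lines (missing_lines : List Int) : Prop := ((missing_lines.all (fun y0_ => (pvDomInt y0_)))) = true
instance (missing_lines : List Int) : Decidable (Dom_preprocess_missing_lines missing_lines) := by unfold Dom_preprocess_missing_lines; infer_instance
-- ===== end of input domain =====

-- B replaces A's two-phase grouping (list-of-lists, then formatting) with one streaming
-- boundary-detecting pass tracking only the current run's start/prev (objective: simpler).


-- ===== PORT A =====
-- group_sequence's loop over range(1, len(lst)) reading lst[i-1], lst[i]: the obvious
-- structural recursion over the tail, carrying the previous element and the same state
-- res (a list of runs, appended to at the back exactly as the Python does).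
def pvGroupLoop (rest : List Int) (prevElem : Int) (res : List (List Int)) : List (List Int) :=
  match rest with
  | [] => res
  | x :: xs =>
    if prevElem + 1 == x then
      pvGroupLoop xs x (res.dropLast ++ [res.getLastD [] ++ [x]])   -- res[-1].append(lst[i])
    else
      pvGroupLoop xs x (res ++ [[x]])                               -- res.append([lst[i]])

-- group_sequence is only called on a non-empty list (A returns "" first); on [] the
-- Python raises IndexError, here we return [] (unreachable from preprocess_missing_lines).
def group_sequence (lst : List Int) : List (List Int) :=
  match lst with
  | [] => []
  | x :: xs => pvGroupLoop xs x [[x]]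

-- sequence[0] / sequence[-1] ported as headD/getLastD: exact, every run is non-empty.
def pvFmtLoop (groups : List (List Int)) (res : List String) : List String :=
  match groups with
  | [] => res
  | seq :: rest =>
    if 1 < seq.length then
      pvFmtLoop rest (res ++ [PySem.Int.toStr (seq.headD 0) ++ "-" ++ PySem.Int.toStr (seq.getLastD 0)])
    else
      pvFmtLoop rest (res ++ [PySem.Int.toStr (seq.headD 0)])

def preprocess_missing_lines (missing_lines : List Int) : String :=
  if missing_lines.length == 0 then ""
  else PySem.Str.join ", " (pvFmtLoop (group_sequence missing_lines) [])

-- ===== PORT B =====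
def pvFmt (start prev : Int) : String :=
  if start == prev then PySem.Int.toStr start
  else PySem.Int.toStr start ++ "-" ++ PySem.Int.toStr prev

-- B's single pass; the final flush after the loop is the [] case.
def pvAltLoop (rest : List Int) (start prev : Int) (parts : List String) : List String :=
  match rest with
  | [] => parts ++ [pvFmt start prev]
  | cur :: xs =>
    if cur != prev + 1 then pvAltLoop xs cur cur (parts ++ [pvFmt start prev])
    else pvAltLoop xs start cur parts

def preprocess_missing_lines_alt (missing_lines : List Int) : String :=
  match missing_lines with
  | [] => ""
  | x :: xs => PySem.Str.join ", " (pvAltLoop xs x x [])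

-- ===== PRECONDITION & SPEC =====
def Spec_preprocess_missing_lines (missing_lines : List Int) (out : String) : Prop := out = preprocess_missing_lines_alt missing_lines
instance (missing_lines : List Int) (out : String) : Decidable (Spec_preprocess_missing_lines missing_lines out) := by unfold Spec_preprocess_missing_lines; infer_instance

-- ===== CLAIM (what is proved, stated in full; the proofs are below) =====
def Claim_equal_preprocess_missing_lines : Prop := ∀ (missing_lines : List Int), Dom_preprocess_missing_lines missing_lines → Spec_preprocess_missing_lines missing_lines (preprocess_missing_lines missing_lines)

-- ===== LEMMAS AND PROOFS =====

theorem pvFmtLoop_out (groups : List (List Int)) (res : List String) :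
    pvFmtLoop groups res = res ++ pvFmtLoop groups [] := by
  induction groups generalizing res with
  | nil => simp [pvFmtLoop]
  | cons g t ih =>
    simp only [pvFmtLoop]
    split_ifs <;> rw [ih, ih ([] ++ _)] <;> simp

theorem pvAltLoop_out (rest : List Int) (start prev : Int) (parts : List String) :
    pvAltLoop rest start prev parts = parts ++ pvAltLoop rest start prev [] := by
  induction rest generalizing start prev parts with
  | nil => simp [pvAltLoop]
  | cons c t ih =>
    simp only [pvAltLoop]
    split_ifs
    · rw [ih, ih _ _ ([] ++ _)]; simp
    · exact ih start c parts

theorem pvFmtLoop_append (a b : List (List Int)) :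
    pvFmtLoop (a ++ b) [] = pvFmtLoop a [] ++ pvFmtLoop b [] := by
  induction a with
  | nil => simp [pvFmtLoop]
  | cons g t ih =>
    simp only [List.cons_append, pvFmtLoop]
    split_ifs <;>
      rw [pvFmtLoop_out (t ++ b), pvFmtLoop_out t, ih] <;> simp

-- A run with head `start`, last `prev`, longer than 1 iff start ≠ prev, formats to pvFmt.
theorem pvFmt_run (run : List Int) (start prev : Int)
    (hh : run.headD 0 = start) (hl : run.getLastD 0 = prev) (hne : run ≠ [])
    (hlen : 1 < run.length ↔ start ≠ prev) :
    pvFmtLoop [run] [] = [pvFmt start prev] := by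
  simp only [List.headD_eq_head?, List.getLastD_eq_getLast?] at hh hl
  by_cases hsp : start = prev
  · have : ¬ 1 < run.length := by simp [hlen, hsp]
    simp [pvFmtLoop, pvFmt, this, hh, hsp]
  · have : 1 < run.length := hlen.mpr hsp
    simp [pvFmtLoop, pvFmt, this, hh, hl, hsp]

-- The key invariant: A's group-then-format on the pending run `run` (with head `start`,
-- last `prev`, start ≤ prev, longer than 1 iff start ≠ prev) produces exactly what
-- B's streaming pass produces from (start, prev).
theorem pvLoop_agree (rest : List Int) (start prev : Int) (run : List Int)
    (res : List (List Int))
    (hh : run.headD 0 = start) (hl : run.getLastD 0 = prev) (hne : run ≠ [])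
    (hlen : 1 < run.length ↔ start ≠ prev) (hle : start ≤ prev) :
    pvFmtLoop (pvGroupLoop rest prev (res ++ [run])) [] =
      pvFmtLoop res [] ++ pvAltLoop rest start prev [] := by
  induction rest generalizing start prev run res with
  | nil =>
    simp only [pvGroupLoop, pvAltLoop]
    rw [pvFmtLoop_append, pvFmt_run run start prev hh hl hne hlen]
    simp
  | cons c t ih =>
    obtain ⟨r, rs, rfl⟩ := List.exists_cons_of_ne_nil hne
    simp only [pvGroupLoop, pvAltLoop]
    by_cases hc : prev + 1 = c
    · have hbeq : (prev + 1 == c) = true := by simpa using hc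
      have hbne : (c != prev + 1) = false := by simp [hc.symm]
      rw [hbeq, hbne]
      simp only [if_true, Bool.false_eq_true, if_false, List.dropLast_concat,
        List.getLastD_concat]
      have hlt : start < c := by omega
      have := ih start c ((r :: rs) ++ [c]) res (by simpa using hh)
        (by rw [List.getLastD_concat]) (by simp) (by simp; omega) (by omega)
      simpa using this
    · have hbeq : (prev + 1 == c) = false := by simpa using hc
      have hbne : (c != prev + 1) = true := by simp; omega
      rw [hbeq, hbne]
      simp only [Bool.false_eq_true, if_false, if_true]
      have := ih c c [c] (res ++ [r :: rs]) (by simp) (by simp) (by simp) (by simp) le_rfl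
      rw [this, pvFmtLoop_append, pvFmt_run (r :: rs) start prev hh hl hne hlen,
        pvAltLoop_out t c c ([] ++ [pvFmt start prev])]
      simp

-- ===== VERDICT (by name: the statement is the Claim_ definition above) =====
theorem preprocess_missing_lines_spec : Claim_equal_preprocess_missing_lines := by
  intro missing_lines _
  unfold Spec_preprocess_missing_lines preprocess_missing_lines preprocess_missing_lines_alt
  match missing_lines with
  | [] => rfl
  | x :: xs =>
    rw [if_neg (by simp)]
    have h := pvLoop_agree xs x x [x] [] (by simp) (by simp) (by simp) (by simp) le_rfl
    simp only [List.nil_append] at h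
    simp only [group_sequence]
    rw [h]
    simp [pvFmtLoop]
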